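-- pv_equiv track=rewrite | github.com/Mayank941125/mcq_test | app.py | is_meaningful_option
-- ===== SOURCE A (Python) =====
-- def is_meaningful_option(option):
--     bad_patterns = ["option", "choice", "answer", "placeholder"]
--     text = option.lower().strip()
--
--     if len(text) < 6:
--         return False
--
--     for bad in bad_patterns:
--         if text == bad or text.startswith(bad + " "):
--             return False
--
--     return True
-- ===== SOURCE B (Python) =====
-- _BAD = ["option", "choice", "answer", "placeholder"]
--
--
-- def is_meaningful_option(option):
--     # Single left-to-right scan of the text keeping the set of still-alive
--     # pattern suffixes (a candidate-pruning simultaneous matcher) instead of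
--     # testing each pattern against the whole text.
--     text = option.lower().strip()
--     if len(text) < 6:
--         return False
--     cands = _BAD
--     for ch in text:
--         if ch == " ":
--             return "" not in cands
--         cands = [w[1:] for w in cands if w[:1] == ch]
--         if not cands:
--             return True
--     return "" not in cands
-- ===== Notes on version B (the rewrite author's own statement) =====
-- stated objective: alternative
-- what changed: Instead of testing each of the four bad patterns against the whole text with equality/startswith, B scans the text once left-to-right while pruning a list of still-alive pattern suffixes (a simultaneous multi-pattern matcher), deciding at the first space or end of text.
import Mathlib
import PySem

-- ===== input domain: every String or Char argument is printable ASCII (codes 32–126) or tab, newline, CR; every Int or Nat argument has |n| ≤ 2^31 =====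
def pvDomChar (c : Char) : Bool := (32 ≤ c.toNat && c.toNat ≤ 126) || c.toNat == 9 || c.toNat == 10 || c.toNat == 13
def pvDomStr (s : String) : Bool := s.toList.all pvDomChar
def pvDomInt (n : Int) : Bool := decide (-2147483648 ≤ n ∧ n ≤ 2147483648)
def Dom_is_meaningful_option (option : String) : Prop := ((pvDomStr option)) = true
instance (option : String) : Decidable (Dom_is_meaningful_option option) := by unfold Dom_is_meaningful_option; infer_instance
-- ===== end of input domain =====

-- B replaces A's per-pattern equality/startswith loop by one left-to-right scan of the
-- text that prunes a set of still-alive pattern suffixes (alternative; same behaviour).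

-- ===== PORT A =====
-- the 'for bad in bad_patterns: … return False' loop, with early return
def pvALoop (text : String) : List String → Bool
  | [] => true
  | bad :: rest =>
      if text == bad || PySem.Str.startswith text (bad ++ " ") then false
      else pvALoop text rest

def is_meaningful_option (option : String) : Bool :=
  let bad_patterns := ["option", "choice", "answer", "placeholder"]
  let text := PySem.Str.strip (PySem.Str.lower option)
  if PySem.Str.len text < 6 then false
  else pvALoop text bad_patterns

-- ===== PORT B =====
-- the module-level _BAD list of Source B
def pvBad : List String := ["option", "choice", "answer", "placeholder"]

-- Source B's 'for ch in text' loop over the candidate suffix list, with its early returns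
def pvBScan : List Char → List (List Char) → Bool
  | [], cands => !(cands.contains ([] : List Char))
  | c :: rest, cands =>
      if c = ' ' then !(cands.contains ([] : List Char))
      else
        -- cands = [w[1:] for w in cands if w[:1] == ch]
        let cands' := cands.filterMap (fun w => if w.take 1 = [c] then some (w.drop 1) else none)
        if cands' = [] then true else pvBScan rest cands'

def is_meaningful_option_alt (option : String) : Bool :=
  let text := PySem.Str.strip (PySem.Str.lower option)
  if PySem.Str.len text < 6 then false
  else pvBScan text.toList (pvBad.map String.toList)

-- ===== PRECONDITION & SPEC =====
def Spec_is_meaningful_option (option : String) (out : Bool) : Prop := out = is_meaningful_option_alt option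
instance (option : String) (out : Bool) : Decidable (Spec_is_meaningful_option option out) := by unfold Spec_is_meaningful_option; infer_instance

-- ===== CLAIM (what is proved, stated in full; the proofs are below) =====
def Claim_equal_is_meaningful_option : Prop := ∀ (option : String), Dom_is_meaningful_option option → Spec_is_meaningful_option option (is_meaningful_option option)

-- ===== LEMMAS AND PROOFS =====

-- A's per-pattern test, at the List Char level
def pvMatch (t b : List Char) : Bool := (t == b) || PySem.Chars.startswith t (b ++ [' '])

lemma pv_match_nil (b : List Char) : pvMatch [] b = (b == []) := by
  cases b with
  | nil => simp [pvMatch]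
  | cons d t =>
      rw [Bool.eq_iff_iff]
      simp [pvMatch, PySem.Chars.startswith_iff]

lemma pv_match_space (rest b : List Char) (hb : ' ' ∉ b) :
    pvMatch (' ' :: rest) b = (b == []) := by
  cases b with
  | nil =>
      rw [Bool.eq_iff_iff]
      simp [pvMatch, PySem.Chars.startswith_iff, List.cons_prefix_cons]
  | cons d t =>
      have hd : d ≠ ' ' := fun e => hb (by simp [e])
      rw [Bool.eq_iff_iff]
      constructor
      · intro hx
        simp only [pvMatch, Bool.or_eq_true, beq_iff_eq, PySem.Chars.startswith_iff,
          List.cons_append, List.cons_prefix_cons, List.cons_eq_cons] at hx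
        rcases hx with ⟨h1, _⟩ | ⟨h1, _⟩
        · exact absurd h1.symm hd
        · exact absurd h1 hd
      · intro hx
        simp at hx

lemma pv_match_cons_nil (c : Char) (hc : c ≠ ' ') (rest : List Char) :
    pvMatch (c :: rest) [] = false := by
  rw [Bool.eq_iff_iff]
  simp [pvMatch, PySem.Chars.startswith_iff, List.cons_prefix_cons]
  exact fun e => hc e.symm

lemma pv_match_cons_cons (c : Char) (rest : List Char) (d : Char) (t : List Char) :
    pvMatch (c :: rest) (d :: t) = ((d == c) && pvMatch rest t) := by
  rw [Bool.eq_iff_iff]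
  simp only [pvMatch, Bool.or_eq_true, Bool.and_eq_true, beq_iff_eq,
    PySem.Chars.startswith_iff, List.cons_append, List.cons_prefix_cons,
    List.cons_eq_cons]
  constructor
  · rintro (⟨h1, h2⟩ | ⟨h1, h2⟩)
    · exact ⟨h1.symm, Or.inl h2⟩
    · exact ⟨h1, Or.inr h2⟩
  · rintro ⟨h1, h2 | h2⟩
    · exact Or.inl ⟨h1.symm, h2⟩
    · exact Or.inr ⟨h1, h2⟩

-- one pruning step preserves the 'some pattern matches' predicate
lemma pv_any_step (c : Char) (hc : c ≠ ' ') (rest : List Char) (cands : List (List Char)) :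
    cands.any (pvMatch (c :: rest)) =
      (cands.filterMap (fun w => if w.take 1 = [c] then some (w.drop 1) else none)).any
        (pvMatch rest) := by
  induction cands with
  | nil => rfl
  | cons w ws ih =>
    cases w with
    | nil =>
        simp only [List.any_cons, List.filterMap_cons, pv_match_cons_nil c hc]
        simpa using ih
    | cons d t =>
        by_cases hd : d = c
        · subst hd
          simp [List.any_cons, pv_match_cons_cons, ih]
        · have hne : ¬ ([d] = [c]) := by simp [hd]
          simp [List.any_cons, pv_match_cons_cons, hd, hne, ih]

-- pruning keeps suffixes space-free
lemma pv_step_nospace (c : Char) (cands : List (List Char))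
    (h : ∀ b ∈ cands, ' ' ∉ b) :
    ∀ b ∈ cands.filterMap (fun w => if w.take 1 = [c] then some (w.drop 1) else none),
      ' ' ∉ b := by
  intro b hb
  rcases List.mem_filterMap.mp hb with ⟨a, ha, hfa⟩
  by_cases hta : a.take 1 = [c]
  · rw [if_pos hta] at hfa
    cases Option.some.inj hfa
    intro hsp
    exact h a ha (List.mem_of_mem_drop hsp)
  · simp [hta] at hfa

lemma pv_contains_any (cands : List (List Char)) :
    cands.contains ([] : List Char) = cands.any (fun b => b == ([] : List Char)) := by
  rw [Bool.eq_iff_iff]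
  simp only [List.contains_iff_mem, List.any_eq_true, beq_iff_eq]
  constructor
  · exact fun hm => ⟨[], hm, rfl⟩
  · rintro ⟨b, hb, rfl⟩
    exact hb

lemma pv_any_eq {p q : List Char → Bool} (l : List (List Char))
    (h : ∀ b ∈ l, p b = q b) : l.any p = l.any q := by
  induction l with
  | nil => rfl
  | cons w ws ih =>
      simp [List.any_cons, h w (by simp), ih (fun b hb => h b (by simp [hb]))]

-- the candidate scan computes '¬ (some pattern matches)'
lemma pv_scan_eq (t : List Char) (cands : List (List Char)) (h : ∀ b ∈ cands, ' ' ∉ b) :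
    pvBScan t cands = !(cands.any (pvMatch t)) := by
  induction t generalizing cands with
  | nil =>
      simp only [pvBScan, pv_contains_any]
      congr 1
      exact (pv_any_eq cands (fun b hb => pv_match_nil b)).symm
  | cons c rest ih =>
      by_cases hc : c = ' '
      · subst hc
        have hval : pvBScan (' ' :: rest) cands = !(cands.contains ([] : List Char)) := by
          simp [pvBScan]
        rw [hval, pv_contains_any]
        congr 1
        exact (pv_any_eq cands (fun b hb => pv_match_space rest b (h b hb))).symm
      · simp only [pvBScan, if_neg hc]
        rw [pv_any_step c hc rest cands]
        set cands' := cands.filterMap (fun w => if w.take 1 = [c] then some (w.drop 1) else none) with hcs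
        by_cases h0 : cands' = []
        · simp [h0]
        · rw [if_neg h0, ih cands' (pv_step_nospace c cands h)]

-- string-level equality tests reduce to lists
lemma pv_beq_toList (a b : String) : (a == b) = (a.toList == b.toList) := by
  rw [Bool.eq_iff_iff]
  simp [String.ext_iff]

-- A's per-pattern String test is pvMatch on toList
lemma pv_word (t b : String) (hbs : (b ++ " ").toList = b.toList ++ [' ']) :
    ((t == b) || PySem.Str.startswith t (b ++ " ")) = pvMatch t.toList b.toList := by
  rw [pvMatch, pv_beq_toList t b,
      show PySem.Str.startswith t (b ++ " ")
        = PySem.Chars.startswith t.toList ((b ++ " ").toList) from rfl, hbs]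

-- the else-branch of A equals the else-branch of B, for any text
lemma pv_branch (t : String) :
    pvALoop t ["option", "choice", "answer", "placeholder"] =
      pvBScan t.toList (pvBad.map String.toList) := by
  rw [pv_scan_eq _ _ (by decide)]
  simp only [pvBad, List.map_cons, List.map_nil, List.any_cons, List.any_nil]
  simp only [pvALoop]
  rw [pv_word t "option" (by decide), pv_word t "choice" (by decide),
      pv_word t "answer" (by decide), pv_word t "placeholder" (by decide)]
  generalize pvMatch t.toList "option".toList = b1
  generalize pvMatch t.toList "choice".toList = b2
  generalize pvMatch t.toList "answer".toList = b3
  generalize pvMatch t.toList "placeholder".toList = b4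
  cases b1 <;> cases b2 <;> cases b3 <;> cases b4 <;> simp

-- ===== VERDICT (by name: the statement is the Claim_ definition above) =====
theorem is_meaningful_option_spec : Claim_equal_is_meaningful_option := by
  intro option _
  simp only [Spec_is_meaningful_option, is_meaningful_option, is_meaningful_option_alt]
  split_ifs with h
  · rfl
  · exact pv_branch _
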